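-- pv_equiv track=rewrite | github.com/sowhat9293/Codility_study | lesson05/02.py | solution
-- ===== SOURCE A (Python) =====
-- def solution(A):
--     # write your code in Python 3.6
--     N = len(A)
--     east_list = []
--     result_num = 0
--     for i in range(N):
--         if not A[i]:
--             east_list.append(i)
--         else:
--             result_num += len(east_list)
--
--     return result_num if result_num <= 1000000000 else -1
-- ===== SOURCE B (Python) =====
-- def solution(A):
--     # Closed form: the k-th west (truthy) fish, at index i, has exactly i - k
--     # east fish before it, so the pair count is sum(west indices) - m*(m-1)//2.
--     west = [i for i, v in enumerate(A) if v]
--     m = len(west)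
--     result = sum(west) - m * (m - 1) // 2
--     return result if result <= 1000000000 else -1
-- ===== Notes on version B (the rewrite author's own statement) =====
-- stated objective: alternative
-- what changed: Replaces A's stateful scan (append east indices, add list length per west fish) with a closed-form computation: collect the indices of west fish and evaluate sum(indices) - m*(m-1)//2 arithmetically.
import Mathlib
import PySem

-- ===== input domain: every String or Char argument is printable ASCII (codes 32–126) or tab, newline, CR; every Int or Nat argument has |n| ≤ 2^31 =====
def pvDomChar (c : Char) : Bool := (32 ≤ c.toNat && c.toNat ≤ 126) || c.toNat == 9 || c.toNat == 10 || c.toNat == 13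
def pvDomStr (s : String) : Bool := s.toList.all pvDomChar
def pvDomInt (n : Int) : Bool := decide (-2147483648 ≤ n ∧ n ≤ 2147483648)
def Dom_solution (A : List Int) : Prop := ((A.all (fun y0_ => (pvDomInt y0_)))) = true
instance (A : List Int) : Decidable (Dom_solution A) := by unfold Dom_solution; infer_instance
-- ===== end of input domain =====

-- B replaces A's stateful forward scan with a closed form: the pair count equals
-- sum(indices of west fish) - m*(m-1)//2, computed arithmetically (alternative).

-- ===== PORT A =====
-- forward scan: append east indices, add len(east_list) on each west fish, then cap
def solution (A : List Int) : Int :=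
  let st := (PySem.List.enumerate A 0).foldl
    (fun (s : List Int × Int) iv =>
      if iv.2 == 0 then (s.1 ++ [iv.1], s.2) else (s.1, s.2 + (s.1.length : Int)))
    ([], 0)
  if st.2 ≤ 1000000000 then st.2 else -1

-- ===== PORT B =====
-- closed form: indices of truthy elements, sum(west) - m*(m-1)//2, then the same cap
def solution_alt (A : List Int) : Int :=
  let west := ((PySem.List.enumerate A 0).filter (fun iv => !(iv.2 == 0))).map Prod.fst
  let m : Int := (west.length : Int)
  let result := west.foldl (· + ·) 0 - PySem.Int.floordiv (m * (m - 1)) 2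
  if result ≤ 1000000000 then result else -1

-- ===== PRECONDITION & SPEC =====
def Spec_solution (A : List Int) (out : Int) : Prop := out = solution_alt A
instance (A : List Int) (out : Int) : Decidable (Spec_solution A out) := by unfold Spec_solution; infer_instance

-- ===== CLAIM (what is proved, stated in full; the proofs are below) =====
def Claim_equal_solution : Prop := ∀ (A : List Int), Dom_solution A → Spec_solution A (solution A)

-- ===== LEMMAS AND PROOFS =====

/-- Pair count with `e` east fish already seen (A's recursion on the values). -/
def cntA : List Int → Int → Int
  | [], _ => 0
  | v :: vs, e => if v == 0 then cntA vs (e + 1) else e + cntA vs e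

/-- Number of west (nonzero) fish. -/
def ones : List Int → Int
  | [] => 0
  | v :: vs => if v == 0 then ones vs else ones vs + 1

/-- Sum of the indices (starting at `n`) of the nonzero elements. -/
def sW : List Int → Int → Int
  | [], _ => 0
  | v :: vs, n => (if v == 0 then 0 else n) + sW vs (n + 1)

theorem foldA_spec (L : List (Int × Int)) (el : List Int) (r : Int) :
    (L.foldl (fun (s : List Int × Int) iv =>
        if iv.2 == 0 then (s.1 ++ [iv.1], s.2) else (s.1, s.2 + (s.1.length : Int)))
      (el, r)).2 = r + cntA (L.map Prod.snd) (el.length : Int) := by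
  induction L generalizing el r with
  | nil => simp [cntA]
  | cons hd tl ih =>
    simp only [List.foldl_cons, List.map_cons, cntA]
    by_cases h : hd.2 = 0
    · rw [if_pos (by simp [h]), if_pos (by simp [h]), ih]
      simp
    · rw [if_neg (by simp [h]), if_neg (by simp [h]), ih]
      ring

theorem cntA_closed (L : List Int) (e n : Int) :
    2 * cntA L e = 2 * sW L n + 2 * (e - n) * ones L - ones L * (ones L - 1) := by
  induction L generalizing e n with
  | nil => simp [cntA, sW, ones]
  | cons hd tl ih =>
    by_cases h : hd = 0
    · simp only [cntA, sW, ones, if_pos (by simp [h] : (hd == 0) = true)]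
      rw [ih (e + 1) (n + 1)]
      ring
    · simp only [cntA, sW, ones, if_neg (by simp [h] : ¬ (hd == 0) = true)]
      rw [mul_add, ih e (n + 1)]
      ring

theorem filtered_sum (A : List Int) (n acc : Int) :
    (((PySem.List.enumerate A n).filter (fun iv => !(iv.2 == 0))).map Prod.fst).foldl
      (· + ·) acc = acc + sW A n := by
  induction A generalizing n acc with
  | nil => simp [PySem.List.enumerate_nil, sW]
  | cons hd tl ih =>
    simp only [PySem.List.enumerate_cons, List.filter_cons, sW]
    by_cases h : hd = 0
    · rw [if_neg (by simp [h]), ih]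
      simp [h]
    · rw [if_pos (by simp [h]), List.map_cons, List.foldl_cons, ih]
      simp [h]; ring

theorem filtered_len (A : List Int) (n : Int) :
    ((((PySem.List.enumerate A n).filter (fun iv => !(iv.2 == 0))).map Prod.fst).length : Int)
      = ones A := by
  induction A generalizing n with
  | nil => simp [PySem.List.enumerate_nil, ones]
  | cons hd tl ih =>
    simp only [PySem.List.enumerate_cons, List.filter_cons, ones]
    by_cases h : hd = 0
    · rw [if_neg (by simp [h]), ih]
      simp [h]
    · rw [if_pos (by simp [h]), List.map_cons, List.length_cons]
      have ih' := ih (n + 1)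
      rw [List.length_map] at ih'
      simp [h, ih']

-- ===== VERDICT (by name: the statement is the Claim_ definition above) =====
theorem solution_spec : Claim_equal_solution := by
  intro A _
  show solution A = solution_alt A
  unfold solution solution_alt
  simp only [foldA_spec, PySem.List.map_snd_enumerate, filtered_sum, filtered_len, zero_add]
  have key : 2 * cntA A 0 = 2 * sW A 0 - ones A * (ones A - 1) := by
    have := cntA_closed A 0 0; linarith
  have hfd : PySem.Int.floordiv (ones A * (ones A - 1)) 2 = sW A 0 - cntA A 0 := by
    have h2 : ones A * (ones A - 1) = 2 * (sW A 0 - cntA A 0) := by linarith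
    rw [h2, PySem.Int.floordiv_eq_ediv_of_pos (by norm_num)]
    omega
  rw [hfd]
  norm_num
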